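-- pv_equiv track=rewrite | github.com/hadifanatics365/365Podcast | src/services/script_engine/ssml_processor.py | add_natural_pauses
-- ===== SOURCE A (Python) =====
-- def add_natural_pauses(script: str) -> str:
--     """
--     Add natural pauses after sentences and sections.
--
--     Args:
--         script: Script text
--
--     Returns:
--         Script with added pause markers
--     """
--     # Add pause after match transitions
--     transitions = [
--         "Moving on to",
--         "Now let's look at",
--         "Turning to",
--         "Meanwhile",
--         "In other action",
--         "Elsewhere",
--     ]
--
--     result = script
--     for transition in transitions:
--         result = result.replace(
--             transition,
--             f"[PAUSE:medium] {transition}"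
--         )
--
--     return result
-- ===== SOURCE B (Python) =====
-- def add_natural_pauses(script: str) -> str:
--     """Single left-to-right scan: at each position, prepend a pause marker
--     before the first matching transition phrase, instead of six replace passes."""
--     transitions = (
--         "Moving on to",
--         "Now let's look at",
--         "Turning to",
--         "Meanwhile",
--         "In other action",
--         "Elsewhere",
--     )
--     out = []
--     i = 0
--     n = len(script)
--     while i < n:
--         for t in transitions:
--             if script.startswith(t, i):
--                 out.append("[PAUSE:medium] ")
--                 out.append(t)
--                 i += len(t)
--                 break
--         else:
--             out.append(script[i])
--             i += 1
--     return "".join(out)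
-- ===== Notes on version B (the rewrite author's own statement) =====
-- stated objective: alternative
-- what changed: Replaces six sequential full-string str.replace passes with a single left-to-right scan that tries all six transition phrases at each position and prepends the pause marker in one pass.
import Mathlib
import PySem

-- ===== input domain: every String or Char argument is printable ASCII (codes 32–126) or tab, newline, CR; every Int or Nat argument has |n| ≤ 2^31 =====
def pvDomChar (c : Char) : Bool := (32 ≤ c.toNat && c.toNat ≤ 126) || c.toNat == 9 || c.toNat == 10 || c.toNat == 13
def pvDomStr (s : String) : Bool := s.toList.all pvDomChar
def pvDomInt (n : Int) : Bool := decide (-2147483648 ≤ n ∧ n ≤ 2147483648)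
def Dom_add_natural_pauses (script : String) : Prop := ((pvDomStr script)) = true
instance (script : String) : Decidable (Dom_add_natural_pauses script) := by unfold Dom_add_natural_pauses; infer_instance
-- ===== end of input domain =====

-- B replaces A's six sequential full-string str.replace passes by one left-to-right
-- scan that tries the six transition phrases at each position (objective: alternative).

-- ===== PORT A =====
def add_natural_pauses (script : String) : String :=
  let transitions : List String :=
    ["Moving on to", "Now let's look at", "Turning to", "Meanwhile",
     "In other action", "Elsewhere"]
  transitions.foldl
    (fun result transition =>
      PySem.Str.replace result transition ("[PAUSE:medium] " ++ transition))
    script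

-- ===== PORT B =====
def pvMarker : List Char := "[PAUSE:medium] ".toList

def pvTransitionsB : List (List Char) :=
  ["Moving on to".toList, "Now let's look at".toList, "Turning to".toList,
   "Meanwhile".toList, "In other action".toList, "Elsewhere".toList]

-- one pass over the characters; at each position the first matching transition
-- (in tuple order, as B's inner for loop) gets the marker prepended
def pvScan (ts : List (List Char)) : List Char → List Char
  | [] => []
  | c :: rest =>
    match ts.find? (fun p => p.isPrefixOf (c :: rest)) with
    | some p =>
      if _hp : p.length = 0 then
        c :: pvScan ts rest        -- totality guard; unreachable: every phrase is nonempty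
      else pvMarker ++ p ++ pvScan ts ((c :: rest).drop p.length)
    | none => c :: pvScan ts rest
  termination_by s => s.length
  decreasing_by all_goals (simp; try omega)

def add_natural_pauses_alt (script : String) : String :=
  String.ofList (pvScan pvTransitionsB script.toList)

-- ===== PRECONDITION & SPEC =====
def Spec_add_natural_pauses (script : String) (out : String) : Prop := out = add_natural_pauses_alt script
instance (script : String) (out : String) : Decidable (Spec_add_natural_pauses script out) := by unfold Spec_add_natural_pauses; infer_instance

-- ===== CLAIM (what is proved, stated in full; the proofs are below) =====
def Claim_equal_add_natural_pauses : Prop := ∀ (script : String), Dom_add_natural_pauses script → Spec_add_natural_pauses script (add_natural_pauses script)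

-- ===== LEMMAS AND PROOFS =====

-- ---- unfolding PySem.Chars.replace (nonempty pattern) ----

theorem pv_go_acc (old new : List Char) :
    ∀ fuel l acc, PySem.Chars.replace.go old new fuel l acc
      = acc.reverse ++ PySem.Chars.replace.go old new fuel l [] := by
  intro fuel
  induction fuel with
  | zero => intro l acc; simp [PySem.Chars.replace.go]
  | succ f ih =>
    intro l acc
    cases l with
    | nil => simp [PySem.Chars.replace.go]
    | cons c t =>
      rw [PySem.Chars.replace.go, PySem.Chars.replace.go]
      split
      · rw [ih _ (new.reverse ++ acc), ih _ (new.reverse ++ [])]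
        simp
      · rw [ih t [c], ih t (c :: acc)]
        simp

theorem pv_go_fuel (old new : List Char) (hold : old ≠ []) :
    ∀ f1 f2 l acc, l.length ≤ f1 → l.length ≤ f2 →
      PySem.Chars.replace.go old new f1 l acc = PySem.Chars.replace.go old new f2 l acc := by
  intro f1
  induction f1 with
  | zero =>
    intro f2 l acc h1 h2
    have : l = [] := List.eq_nil_of_length_eq_zero (Nat.le_zero.mp h1)
    subst this
    cases f2 <;> simp [PySem.Chars.replace.go]
  | succ f ih =>
    intro f2 l acc h1 h2
    cases l with
    | nil => cases f2 <;> simp [PySem.Chars.replace.go]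
    | cons c t =>
      cases f2 with
      | zero => simp at h2
      | succ f2' =>
        rw [PySem.Chars.replace.go, PySem.Chars.replace.go]
        have hol : 1 ≤ old.length := by
          cases old with
          | nil => exact absurd rfl hold
          | cons a b => simp
        split
        · apply ih <;> rw [List.length_drop] <;> simp at h1 h2 ⊢ <;> omega
        · apply ih <;> simp at h1 h2 ⊢ <;> omega

theorem pv_replace_nil (old new : List Char) (hold : old ≠ []) :
    PySem.Chars.replace [] old new = [] := by
  rw [PySem.Chars.replace]
  simp [hold, PySem.Chars.replace.go]

theorem pv_replace_cons (old new : List Char) (hold : old ≠ []) (c : Char) (t : List Char) :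
    PySem.Chars.replace (c :: t) old new
      = if old.isPrefixOf (c :: t) then new ++ PySem.Chars.replace ((c :: t).drop old.length) old new
        else c :: PySem.Chars.replace t old new := by
  have hol : 1 ≤ old.length := by cases old with | nil => exact absurd rfl hold | cons a b => simp
  have hE : old.isEmpty = false := by simp; exact hold
  rw [PySem.Chars.replace]
  simp only [hE, Bool.false_eq_true, if_false, List.length_cons]
  rw [PySem.Chars.replace.go]
  split
  · rename_i hpre
    rw [pv_go_acc]
    have hdl : (List.drop old.length (c :: t)).length ≤ t.length := by
      rw [List.length_drop]; simp; omega
    rw [pv_go_fuel old new hold t.length (List.drop old.length (c :: t)).length (List.drop old.length (c :: t)) [] hdl (le_refl _)]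
    conv_rhs => rw [PySem.Chars.replace]
    simp only [hE, Bool.false_eq_true, if_false]
    simp
  · rw [pv_go_acc]
    
    conv_rhs => rw [PySem.Chars.replace]
    simp only [hE, Bool.false_eq_true, if_false]
    simp


theorem pv_replace_append (old new : List Char) (hold : old ≠ []) :
    ∀ x y, (∀ i, i < x.length → ¬ old <+: (x.drop i ++ y)) →
      PySem.Chars.replace (x ++ y) old new = x ++ PySem.Chars.replace y old new := by
  intro x
  induction x with
  | nil => intro y _; simp
  | cons c x' ih =>
    intro y h
    rw [List.cons_append, pv_replace_cons old new hold]
    have h0 : ¬ old.isPrefixOf (c :: (x' ++ y)) = true := by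
      rw [List.isPrefixOf_iff_prefix]
      exact h 0 (by simp)
    rw [if_neg h0]
    rw [ih y (fun i hi => by simpa using h (i + 1) (by simpa using hi))]
    simp

theorem pv_replace_head (old new : List Char) (hold : old ≠ []) (y : List Char) :
    PySem.Chars.replace (old ++ y) old new = new ++ PySem.Chars.replace y old new := by
  cases old with
  | nil => exact absurd rfl hold
  | cons o o' =>
    rw [List.cons_append, pv_replace_cons (o :: o') new hold o (o' ++ y)]
    have hpre : (o :: o').isPrefixOf (o :: (o' ++ y)) = true := by
      rw [List.isPrefixOf_iff_prefix]
      exact ⟨y, by simp⟩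
    simp only [hpre, if_true]
    have : List.drop (o :: o').length (o :: (o' ++ y)) = y := by
      simp [List.drop_left (l₁ := o') (l₂ := y)]
    rw [this]

-- ---- pvScan structure ----

theorem pvScan_cons (ts : List (List Char)) (c : Char) (rest : List Char) :
    pvScan ts (c :: rest)
      = match ts.find? (fun p => p.isPrefixOf (c :: rest)) with
        | some p =>
          if p.length = 0 then c :: pvScan ts rest
          else pvMarker ++ p ++ pvScan ts ((c :: rest).drop p.length)
        | none => c :: pvScan ts rest := by
  rw [pvScan]
  split
  · split
    · simp
    · simp
  · rfl

theorem pvScan_nil_ts : ∀ s, pvScan [] s = s := by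
  intro s
  induction s with
  | nil => rw [pvScan]
  | cons c rest ih => rw [pvScan_cons]; simp [ih]

theorem pvScan_append (ts : List (List Char)) :
    ∀ u r, (∀ j, j < u.length → ∀ p ∈ ts, ¬ p <+: (u.drop j ++ r)) →
      pvScan ts (u ++ r) = u ++ pvScan ts r := by
  intro u
  induction u with
  | nil => intro r _; simp
  | cons c u' ih =>
    intro r h
    have hnone : ts.find? (fun p => p.isPrefixOf (c :: u' ++ r)) = none := by
      apply List.find?_eq_none.mpr
      intro p hp
      simp only [List.isPrefixOf_iff_prefix]
      have := h 0 (by simp) p hp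
      simpa using this
    rw [List.cons_append, pvScan_cons]
    rw [show (c :: (u' ++ r)) = (c :: u' ++ r) from rfl, hnone]
    simp only [List.cons_append, List.cons.injEq, true_and]
    exact ih r (fun j hj p hp => by simpa using h (j + 1) (by simpa using hj) p hp)

theorem pv_not_prefix_scan (ts : List (List Char)) :
    ∀ v s, '[' ∉ v → ¬ v <+: s → ¬ v <+: pvScan ts s := by
  intro v s
  induction s generalizing v with
  | nil =>
    intro _ hns
    rw [pvScan]
    exact hns
  | cons c rest ih =>
    intro h5 hns
    rw [pvScan_cons]
    have tail_case : ¬ v <+: c :: pvScan ts rest := by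
      intro hv
      cases v with
      | nil => exact hns (List.nil_prefix)
      | cons c' v' =>
        rw [List.cons_prefix_cons] at hv
        obtain ⟨rfl, hv'⟩ := hv
        have hns' : ¬ v' <+: rest := fun hp => hns (List.cons_prefix_cons.mpr ⟨rfl, hp⟩)
        exact ih v' (fun hm => h5 (List.mem_cons_of_mem _ hm)) hns' hv'
    split
    · split
      · exact tail_case
      · intro hv
        cases v with
        | nil => exact hns (List.nil_prefix)
        | cons c' v' =>
          have : pvMarker = '[' :: "PAUSE:medium] ".toList := by decide
          rw [this, List.append_assoc, List.cons_append, List.cons_prefix_cons] at hv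
          exact h5 (by simp [hv.1])
    · exact tail_case

-- ---- the crux: one more replace pass = scan with one more phrase ----

theorem pv_step (ts : List (List Char)) (t : List Char)
    (ht : t ≠ [])
    (hts : ∀ p ∈ ts, p ≠ [])
    (h2 : ∀ p ∈ ts, ∀ i, i < (pvMarker ++ p).length →
            ¬ t <+: ((pvMarker ++ p).drop i) ∧ ¬ ((pvMarker ++ p).drop i <+: t))
    (h4 : ∀ p ∈ ts, ∀ j, j < t.length → 0 < j →
            ¬ p <+: t.drop j ∧ ¬ (t.drop j <+: p))
    (h5 : '[' ∉ t) :
    ∀ s, PySem.Chars.replace (pvScan ts s) t (pvMarker ++ t) = pvScan (ts ++ [t]) s := by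
  suffices H : ∀ n s, s.length ≤ n →
      PySem.Chars.replace (pvScan ts s) t (pvMarker ++ t) = pvScan (ts ++ [t]) s from
    fun s => H s.length s le_rfl
  intro n
  induction n with
  | zero =>
    intro s hs
    have : s = [] := List.eq_nil_of_length_eq_zero (Nat.le_zero.mp hs)
    subst this
    rw [pvScan, pvScan, pv_replace_nil t (pvMarker ++ t) ht]
  | succ n ih =>
    intro s hs
    cases s with
    | nil => rw [pvScan, pvScan, pv_replace_nil t (pvMarker ++ t) ht]
    | cons c rest =>
      cases hf : ts.find? (fun p => p.isPrefixOf (c :: rest)) with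
      | some p =>
        have hmem : p ∈ ts := List.mem_of_find?_eq_some hf
        have hppre : p <+: (c :: rest) := by
          have := List.find?_some hf
          simpa [List.isPrefixOf_iff_prefix] using this
        have hpne : p ≠ [] := hts p hmem
        have hplen : 0 < p.length := List.length_pos_iff.mpr hpne
        have hfall : (ts ++ [t]).find? (fun p => p.isPrefixOf (c :: rest)) = some p := by
          rw [List.find?_append, hf]; rfl
        rw [pvScan_cons, pvScan_cons, hf, hfall]
        simp only [if_neg (by omega : ¬ p.length = 0), List.append_assoc]
        rw [← List.append_assoc, ← List.append_assoc]
        rw [pv_replace_append t (pvMarker ++ t) ht (pvMarker ++ p) _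
          (fun i hi hpre => by
            rcases List.prefix_or_prefix_of_prefix hpre (List.prefix_append _ _) with h | h
            · exact (h2 p hmem i hi).1 h
            · exact (h2 p hmem i hi).2 h)]
        rw [ih (List.drop p.length (c :: rest)) (by
          rw [List.length_drop]
          have : rest.length + 1 ≤ n + 1 := by simpa using hs
          simp; omega)]
      | none =>
        have hnone : ∀ p ∈ ts, ¬ p <+: (c :: rest) := by
          intro p hp
          have h := List.find?_eq_none.mp hf p hp
          simpa [List.isPrefixOf_iff_prefix] using h
        by_cases htp : t <+: (c :: rest)
        · obtain ⟨rr, hrr⟩ := htp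
          have hrrlen : rr.length ≤ n := by
            have hlen : t.length + rr.length = rest.length + 1 := by
              have := congrArg List.length hrr; simpa using this
            have h1 : 1 ≤ t.length := List.length_pos_iff.mpr ht
            have hs' : rest.length + 1 ≤ n + 1 := by simpa using hs
            omega
          have hscan : pvScan ts (t ++ rr) = t ++ pvScan ts rr := by
            apply pvScan_append
            intro j hj p hp hpre
            rcases Nat.eq_zero_or_pos j with rfl | hj0
            · rw [List.drop_zero, hrr] at hpre
              exact hnone p hp hpre
            · rcases List.prefix_or_prefix_of_prefix hpre (List.prefix_append _ _) with h | h
              · exact (h4 p hp j hj hj0).1 h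
              · exact (h4 p hp j hj hj0).2 h
          have hfall : (ts ++ [t]).find? (fun p => p.isPrefixOf (c :: rest)) = some t := by
            rw [List.find?_append, hf]
            have : t.isPrefixOf (c :: rest) = true := by
              rw [List.isPrefixOf_iff_prefix]; exact ⟨rr, hrr⟩
            simp [List.find?, this]
          have hlhs : PySem.Chars.replace (pvScan ts (c :: rest)) t (pvMarker ++ t)
              = (pvMarker ++ t) ++ pvScan (ts ++ [t]) rr := by
            rw [← hrr, hscan, pv_replace_head t (pvMarker ++ t) ht, ih rr hrrlen]
          rw [hlhs, pvScan_cons, hfall]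
          have hdrop : List.drop t.length (c :: rest) = rr := by
            rw [← hrr]; exact List.drop_left ..
          simp [hdrop, List.length_eq_zero_iff, ht, List.append_assoc]
        · have hfall : (ts ++ [t]).find? (fun p => p.isPrefixOf (c :: rest)) = none := by
            rw [List.find?_append, hf]
            have : t.isPrefixOf (c :: rest) = false := by
              rw [← Bool.not_eq_true, List.isPrefixOf_iff_prefix]; exact htp
            simp [List.find?, this]
          rw [pvScan_cons, pvScan_cons, hf, hfall]
          have hnp : ¬ t <+: (c :: pvScan ts rest) := by
            intro hv
            cases t with
            | nil => exact ht rfl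
            | cons tc tt =>
              rw [List.cons_prefix_cons] at hv
              obtain ⟨rfl, hv'⟩ := hv
              have hns' : ¬ tt <+: rest := fun hp => htp (List.cons_prefix_cons.mpr ⟨rfl, hp⟩)
              exact pv_not_prefix_scan ts tt rest (fun hm => h5 (List.mem_cons_of_mem _ hm)) hns' hv'
          rw [pv_replace_cons t (pvMarker ++ t) ht]
          rw [if_neg (by simpa [List.isPrefixOf_iff_prefix] using hnp)]
          rw [ih rest (by simpa using Nat.lt_succ_iff.mp (by simpa using hs))]

theorem pv_main (l : List Char) :
    PySem.Chars.replace (PySem.Chars.replace (PySem.Chars.replace (PySem.Chars.replace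
      (PySem.Chars.replace (PySem.Chars.replace l
        "Moving on to".toList (pvMarker ++ "Moving on to".toList))
        "Now let's look at".toList (pvMarker ++ "Now let's look at".toList))
        "Turning to".toList (pvMarker ++ "Turning to".toList))
        "Meanwhile".toList (pvMarker ++ "Meanwhile".toList))
        "In other action".toList (pvMarker ++ "In other action".toList))
        "Elsewhere".toList (pvMarker ++ "Elsewhere".toList)
      = pvScan pvTransitionsB l := by
  have e1 : PySem.Chars.replace (l) "Moving on to".toList (pvMarker ++ "Moving on to".toList) = pvScan ["Moving on to".toList] l := by
    have h := pv_step [] "Moving on to".toList (by decide) (by decide) (by decide) (by decide) (by decide) l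
    rwa [pvScan_nil_ts l] at h
  have e2 : PySem.Chars.replace (pvScan ["Moving on to".toList] l) "Now let's look at".toList (pvMarker ++ "Now let's look at".toList) = pvScan ["Moving on to".toList, "Now let's look at".toList] l := by
    have h := pv_step ["Moving on to".toList] "Now let's look at".toList (by decide) (by decide) (by decide) (by decide) (by decide) l
    exact h
  have e3 : PySem.Chars.replace (pvScan ["Moving on to".toList, "Now let's look at".toList] l) "Turning to".toList (pvMarker ++ "Turning to".toList) = pvScan ["Moving on to".toList, "Now let's look at".toList, "Turning to".toList] l := by
    have h := pv_step ["Moving on to".toList, "Now let's look at".toList] "Turning to".toList (by decide) (by decide) (by decide) (by decide) (by decide) l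
    exact h
  have e4 : PySem.Chars.replace (pvScan ["Moving on to".toList, "Now let's look at".toList, "Turning to".toList] l) "Meanwhile".toList (pvMarker ++ "Meanwhile".toList) = pvScan ["Moving on to".toList, "Now let's look at".toList, "Turning to".toList, "Meanwhile".toList] l := by
    have h := pv_step ["Moving on to".toList, "Now let's look at".toList, "Turning to".toList] "Meanwhile".toList (by decide) (by decide) (by decide) (by decide) (by decide) l
    exact h
  have e5 : PySem.Chars.replace (pvScan ["Moving on to".toList, "Now let's look at".toList, "Turning to".toList, "Meanwhile".toList] l) "In other action".toList (pvMarker ++ "In other action".toList) = pvScan ["Moving on to".toList, "Now let's look at".toList, "Turning to".toList, "Meanwhile".toList, "In other action".toList] l := by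
    have h := pv_step ["Moving on to".toList, "Now let's look at".toList, "Turning to".toList, "Meanwhile".toList] "In other action".toList (by decide) (by decide) (by decide) (by decide) (by decide) l
    exact h
  have e6 : PySem.Chars.replace (pvScan ["Moving on to".toList, "Now let's look at".toList, "Turning to".toList, "Meanwhile".toList, "In other action".toList] l) "Elsewhere".toList (pvMarker ++ "Elsewhere".toList) = pvScan ["Moving on to".toList, "Now let's look at".toList, "Turning to".toList, "Meanwhile".toList, "In other action".toList, "Elsewhere".toList] l := by
    have h := pv_step ["Moving on to".toList, "Now let's look at".toList, "Turning to".toList, "Meanwhile".toList, "In other action".toList] "Elsewhere".toList (by decide) (by decide) (by decide) (by decide) (by decide) l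
    exact h
  rw [e1, e2, e3, e4, e5, e6]; rfl


-- ===== VERDICT (by name: the statement is the Claim_ definition above) =====
theorem add_natural_pauses_spec : Claim_equal_add_natural_pauses := by
  intro script _
  unfold Spec_add_natural_pauses add_natural_pauses add_natural_pauses_alt
  simp only [List.foldl_cons, List.foldl_nil, PySem.Str.replace,
    String.toList_ofList, String.toList_append]
  exact congrArg String.ofList (pv_main script.toList)
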